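-- pv_equiv track=rewrite | github.com/miliar/Code_Jam_Webscraper | solutions_python/Problem_130/41.py | best_position
-- ===== SOURCE A (Python) =====
-- def best_position(k, n):
--     """
--     1-based indexing
--     """
--     total = 2 ** n
--     above = k - 1
--     below = total - k
--     wins = 0
--     while below > 0:
--         wins += 1
--         killed_above = above // 2
--         killed_below = (above + below + 1) // 2 - killed_above
--         above -= killed_above
--         below -= killed_below
--     losses = n - wins
--     position = 2 ** losses
--     return position
-- ===== SOURCE B (Python) =====
-- def best_position(k, n):
--     """
--     1-based indexing
--     """
--     d = 2 ** n - k + 1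
--     wins = d.bit_length() - 1 if d >= 1 else 0
--     return 2 ** (n - wins)
-- ===== Notes on version B (the rewrite author's own statement) =====
-- stated objective: faster
-- what changed: replaces the round-by-round elimination loop tracking above/below with a closed form: wins = bit_length(2**n - k + 1) - 1 (floor log2), position = 2**(n - wins)
-- outside the precondition, e.g. on best_position(-1, -1): A returns 0.125, B raises AttributeError; on best_position(-20, 0): A returns 0.03125, B returns 0.0625
import Mathlib
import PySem

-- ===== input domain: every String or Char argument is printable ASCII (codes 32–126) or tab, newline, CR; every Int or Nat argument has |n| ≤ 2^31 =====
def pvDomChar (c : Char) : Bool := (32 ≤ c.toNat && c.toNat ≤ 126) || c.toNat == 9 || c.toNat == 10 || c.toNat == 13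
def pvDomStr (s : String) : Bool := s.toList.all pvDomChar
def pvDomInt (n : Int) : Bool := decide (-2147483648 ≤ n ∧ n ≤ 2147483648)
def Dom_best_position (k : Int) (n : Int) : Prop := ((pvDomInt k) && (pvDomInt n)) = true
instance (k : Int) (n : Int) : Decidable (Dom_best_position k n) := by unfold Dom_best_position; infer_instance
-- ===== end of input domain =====

-- B replaces A's round-by-round elimination loop with a closed-form bit_length computation (faster).


-- ===== PORT A =====
-- the 'while below > 0' loop of A, step for step
def bpLoop (above below wins : Int) : Int :=
  if h : 0 < below then
    let killed_above := PySem.Int.floordiv above 2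
    let killed_below := PySem.Int.floordiv (above + below + 1) 2 - killed_above
    bpLoop (above - killed_above) (below - killed_below) (wins + 1)
  else wins
termination_by below.toNat
decreasing_by
  rw [PySem.Int.floordiv_eq_ediv_of_pos (by norm_num), PySem.Int.floordiv_eq_ediv_of_pos (by norm_num)]
  omega

def best_position (k : Int) (n : Int) : Int :=
  let total : Int := 2 ^ n.toNat        -- 2 ** n; exact for n ≥ 0 (for n < 0 Python yields a float, outside Pre_)
  let above := k - 1
  let below := total - k
  let wins := bpLoop above below 0
  let losses := n - wins
  2 ^ losses.toNat                       -- 2 ** losses; exact for losses ≥ 0, guaranteed on Pre_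

-- ===== PORT B =====
def best_position_alt (k : Int) (n : Int) : Int :=
  let d : Int := 2 ^ n.toNat - k + 1     -- 2 ** n - k + 1; exact for n ≥ 0 (outside Pre_ Python yields a float)
  let wins : Int := if 1 ≤ d then (PySem.Int.bitLength d : Int) - 1 else 0
  2 ^ (n - wins).toNat                   -- 2 ** (n - wins); exact for n - wins ≥ 0, guaranteed on Pre_

-- ===== PRECONDITION & SPEC =====
-- Pre_ excludes n < 0 and k ≤ 1 - 2^n: on those inputs Python's 2**(negative) makes A return a float,
-- not a value of the declared int type.
def Pre_best_position (k : Int) (n : Int) : Prop := 0 ≤ n ∧ 2 - 2 ^ n.toNat ≤ k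
instance (k : Int) (n : Int) : Decidable (Pre_best_position k n) := by unfold Pre_best_position; infer_instance
def pvWitness_best_position : Int × Int := (3, 4)

def Spec_best_position (k : Int) (n : Int) (out : Int) : Prop := out = best_position_alt k n
instance (k : Int) (n : Int) (out : Int) : Decidable (Spec_best_position k n out) := by unfold Spec_best_position; infer_instance

-- ===== CLAIM (what is proved, stated in full; the proofs are below) =====
def Claim_equal_best_position : Prop := ∀ (k : Int) (n : Int), Dom_best_position k n → Pre_best_position k n → Spec_best_position k n (best_position k n)

-- ===== LEMMAS AND PROOFS =====

-- A's loop computes floor(log2(below+1)), provided above+below = 2^j - 1 and below ≤ 2^(j+1) - 2.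
lemma bpLoop_eq (j : Nat) : ∀ a b w : Int, a + b = 2 ^ j - 1 → b ≤ 2 ^ (j + 1) - 2 →
    bpLoop a b w = w + (if 1 ≤ b then (PySem.Int.bitLength (b + 1) : Int) - 1 else 0) := by
  induction j with
  | zero =>
    intro a b w hs hb
    rw [bpLoop]
    have hb0 : ¬ 0 < b := by norm_num at hs hb; omega
    simp [hb0]
    omega
  | succ j ih =>
    intro a b w hs hb
    rw [bpLoop]
    dsimp only
    by_cases h : 0 < b
    · simp only [h, dif_pos]
      have hp : (0:Int) < 2 ^ j := by positivity
      have e1 : (2:Int) ^ (j + 1) = 2 * 2 ^ j := by ring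
      have e2 : (2:Int) ^ (j + 1 + 1) = 2 * (2 * 2 ^ j) := by ring
      have hs' : a + b = 2 * 2 ^ j - 1 := by omega
      have hb' : b ≤ 2 * (2 * 2 ^ j) - 2 := by omega
      rw [PySem.Int.floordiv_eq_ediv_of_pos (by norm_num),
          PySem.Int.floordiv_eq_ediv_of_pos (by norm_num)]
      have hB' : b - ((a + b + 1) / 2 - a / 2) = (b - 1) / 2 := by omega
      have hsum : (a - a / 2) + (b - ((a + b + 1) / 2 - a / 2)) = 2 ^ j - 1 := by omega
      have hble : b - ((a + b + 1) / 2 - a / 2) ≤ 2 ^ (j + 1) - 2 := by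
        rw [pow_succ]; omega
      rw [ih _ _ (w + 1) hsum hble, hB']
      have hbl : (PySem.Int.bitLength (b + 1) : Int) =
          (PySem.Int.bitLength ((b - 1) / 2 + 1) : Int) + 1 := by
        rw [PySem.Int.bitLength_of_pos (by omega)]
        rw [PySem.Int.floordiv_eq_ediv_of_pos (by norm_num)]
        have : (b + 1) / 2 = (b - 1) / 2 + 1 := by omega
        rw [this]
        push_cast; ring
      have h1b : (1:Int) ≤ b := h
      rw [if_pos h1b]
      by_cases hB1 : (1:Int) ≤ (b - 1) / 2
      · rw [if_pos hB1]
        omega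
      · -- the recursive call was the last iteration: b ∈ {1, 2}
        rw [if_neg hB1]
        have hb2 : b = 1 ∨ b = 2 := by omega
        rcases hb2 with rfl | rfl
        · norm_num [show PySem.Int.bitLength 2 = 2 from by decide]
        · norm_num [show PySem.Int.bitLength 3 = 2 from by decide]
    · rw [dif_neg h]
      have : ¬ (1:Int) ≤ b := by omega
      simp [this]

-- ===== VERDICT (by name: the statement is the Claim_ definition above) =====
theorem best_position_spec : Claim_equal_best_position := by
  intro k n _ hpre
  obtain ⟨hn, hk⟩ := hpre
  unfold Spec_best_position best_position best_position_alt
  dsimp only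
  have hp : (0:Int) < 2 ^ n.toNat := by positivity
  have hsum : (k - 1) + (2 ^ n.toNat - k) = 2 ^ n.toNat - 1 := by ring
  have hble : 2 ^ n.toNat - k ≤ 2 ^ (n.toNat + 1) - 2 := by rw [pow_succ]; omega
  rw [bpLoop_eq n.toNat (k - 1) (2 ^ n.toNat - k) 0 hsum hble]
  by_cases h1 : (1:Int) ≤ 2 ^ n.toNat - k
  · have h2 : (1:Int) ≤ 2 ^ n.toNat - k + 1 := by omega
    simp only [h1, if_pos, h2]
    norm_num
  · by_cases h0 : 2 ^ n.toNat - k = 0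
    · simp only [h0]
      norm_num [show PySem.Int.bitLength 1 = 1 from by decide]
    · have h2 : ¬ (1:Int) ≤ 2 ^ n.toNat - k + 1 := by omega
      simp only [h1, h2]
      norm_num
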